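-- pv_equiv track=rewrite | github.com/serj93/patents-claim-handler | tools/convhandler.py | fuzzyCaseComparison
-- ===== SOURCE A (Python) =====
-- def fuzzyCaseComparison(current_gnc, target_gnc):
--     """
--     Нечеткое сравнение падежей.
--     """
--     if not current_gnc or not target_gnc:
--         return False
--
--     is_connected = False
--
--     combined_cases = [
--         ['Acc', 'Gen'],
--         ['Acc', 'Nom'],
--         ['Loc', 'Ins'], # Unreliably!!!
--     ]
--
--     # Не различаем Вин/Род; Им/Вин
--     for inaccurate in combined_cases:
--         if current_gnc in inaccurate:
--             is_connected = target_gnc in inaccurate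
--             if is_connected:
--                 break
--
--     return is_connected
-- ===== SOURCE B (Python) =====
-- def fuzzyCaseComparison(current_gnc, target_gnc):
--     """
--     Нечеткое сравнение падежей.
--     """
--     if not current_gnc or not target_gnc:
--         return False
--     index = {
--         'Acc': {0, 1},
--         'Gen': {0},
--         'Nom': {1},
--         'Loc': {2},
--         'Ins': {2},
--     }
--     return bool(index.get(current_gnc, set()) & index.get(target_gnc, set()))
-- ===== Notes on version B (the rewrite author's own statement) =====
-- stated objective: idiomatic
-- what changed: Replaces the scan over the list of combined-case groups (with a mutable flag and break) by an inverted index mapping each case to its set of group ids, so the result is a single set-intersection test.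
import Mathlib
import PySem

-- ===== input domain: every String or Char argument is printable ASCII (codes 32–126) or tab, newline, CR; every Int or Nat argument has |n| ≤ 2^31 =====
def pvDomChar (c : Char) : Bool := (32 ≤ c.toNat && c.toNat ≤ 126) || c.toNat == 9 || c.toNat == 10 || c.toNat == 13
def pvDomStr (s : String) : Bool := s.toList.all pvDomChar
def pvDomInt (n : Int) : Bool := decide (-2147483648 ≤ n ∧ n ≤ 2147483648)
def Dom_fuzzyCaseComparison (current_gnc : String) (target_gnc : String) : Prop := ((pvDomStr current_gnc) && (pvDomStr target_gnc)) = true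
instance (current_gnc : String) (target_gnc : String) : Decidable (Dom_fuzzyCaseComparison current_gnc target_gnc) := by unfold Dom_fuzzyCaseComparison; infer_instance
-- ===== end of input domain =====

-- B replaces A's scan of the group list (mutable flag + break) by an inverted index
-- case → set of group ids and one set-intersection test; objective: idiomatic, not faster.

-- ===== PORT A =====
-- the constant combined_cases list of A
def pvCombinedCases : List (List String) :=
  [["Acc", "Gen"], ["Acc", "Nom"], ["Loc", "Ins"]]

-- A's for-loop with the is_connected flag and the break
def pvLoopA (current_gnc target_gnc : String) : List (List String) → Bool → Bool
  | [], is_connected => is_connected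
  | inaccurate :: rest, is_connected =>
    if decide (current_gnc ∈ inaccurate) then
      let is_connected' := decide (target_gnc ∈ inaccurate)
      if is_connected' then is_connected'
      else pvLoopA current_gnc target_gnc rest is_connected'
    else pvLoopA current_gnc target_gnc rest is_connected

def fuzzyCaseComparison (current_gnc : String) (target_gnc : String) : Bool :=
  if current_gnc.isEmpty || target_gnc.isEmpty then false
  else pvLoopA current_gnc target_gnc pvCombinedCases false

-- ===== PORT B =====
-- B's inverted index: case → set of group ids
def pvCaseIndex : PySem.Dict String (PySem.Set Int) :=
  PySem.Dict.ofList
    [("Acc", PySem.Set.ofList [0, 1]),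
     ("Gen", PySem.Set.ofList [0]),
     ("Nom", PySem.Set.ofList [1]),
     ("Loc", PySem.Set.ofList [2]),
     ("Ins", PySem.Set.ofList [2])]

def fuzzyCaseComparison_alt (current_gnc : String) (target_gnc : String) : Bool :=
  if current_gnc.isEmpty || target_gnc.isEmpty then false
  else
    -- bool(index.get(c, set()) & index.get(t, set())) = the intersection is nonempty
    !(PySem.Set.inter (pvCaseIndex.getD current_gnc PySem.Set.empty)
        (pvCaseIndex.getD target_gnc PySem.Set.empty)).isEmpty

-- ===== PRECONDITION & SPEC =====
def Spec_fuzzyCaseComparison (current_gnc : String) (target_gnc : String) (out : Bool) : Prop := out = fuzzyCaseComparison_alt current_gnc target_gnc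
instance (current_gnc : String) (target_gnc : String) (out : Bool) : Decidable (Spec_fuzzyCaseComparison current_gnc target_gnc out) := by unfold Spec_fuzzyCaseComparison; infer_instance

-- ===== CLAIM (what is proved, stated in full; the proofs are below) =====
def Claim_equal_fuzzyCaseComparison : Prop := ∀ (current_gnc : String) (target_gnc : String), Dom_fuzzyCaseComparison current_gnc target_gnc → Spec_fuzzyCaseComparison current_gnc target_gnc (fuzzyCaseComparison current_gnc target_gnc)

-- ===== LEMMAS AND PROOFS =====

-- Every string is one of the five known case names, or none of them
lemma pvCaseSplit (c : String) :
    c = "Acc" ∨ c = "Gen" ∨ c = "Nom" ∨ c = "Loc" ∨ c = "Ins" ∨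
      (c ≠ "Acc" ∧ c ≠ "Gen" ∧ c ≠ "Nom" ∧ c ≠ "Loc" ∧ c ≠ "Ins") := by
  tauto

-- getD on the five known keys, as literals
lemma pvGetD_Acc : pvCaseIndex.getD "Acc" ([] : PySem.Set Int) = [0, 1] := by decide
lemma pvGetD_Gen : pvCaseIndex.getD "Gen" ([] : PySem.Set Int) = [0] := by decide
lemma pvGetD_Nom : pvCaseIndex.getD "Nom" ([] : PySem.Set Int) = [1] := by decide
lemma pvGetD_Loc : pvCaseIndex.getD "Loc" ([] : PySem.Set Int) = [2] := by decide
lemma pvGetD_Ins : pvCaseIndex.getD "Ins" ([] : PySem.Set Int) = [2] := by decide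

-- getD on any other string is the default empty set
lemma pvGetD_other (x : String) (h1 : x ≠ "Acc") (h2 : x ≠ "Gen") (h3 : x ≠ "Nom")
    (h4 : x ≠ "Loc") (h5 : x ≠ "Ins") :
    pvCaseIndex.getD x ([] : PySem.Set Int) = [] := by
  have hD : pvCaseIndex =
      PySem.Dict.mk [("Acc", [0, 1]), ("Gen", [0]), ("Nom", [1]), ("Loc", [2]), ("Ins", [2])] := by
    decide
  rw [hD]
  simp [PySem.Dict.getD, PySem.Dict.get?, beq_iff_eq,
    Ne.symm h1, Ne.symm h2, Ne.symm h3, Ne.symm h4, Ne.symm h5]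

lemma pvCore (c t : String) :
    fuzzyCaseComparison c t = fuzzyCaseComparison_alt c t := by
  unfold fuzzyCaseComparison fuzzyCaseComparison_alt
  rcases Decidable.em (c.isEmpty || t.isEmpty) with h | h
  · simp [h]
  · simp only [h, if_false, Bool.false_eq_true]
    rcases pvCaseSplit c with hc | hc | hc | hc | hc | ⟨h1, h2, h3, h4, h5⟩ <;>
      rcases pvCaseSplit t with ht | ht | ht | ht | ht | ⟨g1, g2, g3, g4, g5⟩ <;>
      subst_vars <;>
      first
        | decide
        | simp_all [pvLoopA, pvCombinedCases, pvGetD_Acc, pvGetD_Gen, pvGetD_Nom,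
            pvGetD_Loc, pvGetD_Ins, pvGetD_other, PySem.Set.inter, PySem.Set.empty]

-- ===== VERDICT (by name: the statement is the Claim_ definition above) =====
theorem fuzzyCaseComparison_spec : Claim_equal_fuzzyCaseComparison := by
  intro c t _
  exact pvCore c t
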